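-- pv_equiv track=rewrite | github.com/genra-submission/GenRA_code | src/anim_gen/keyframes/sampling_utils.py | compute_keyframe_stats
-- ===== SOURCE A (Python) =====
-- from collections.abc import Sequence
-- from typing import Any, Optional
--
-- def compute_keyframe_stats(keyframes_by_tf_by_joint: Sequence[Sequence[Sequence[int]]]) -> dict[str, Any]:
--     n_tf = len(keyframes_by_tf_by_joint)
--     n_joints = len(keyframes_by_tf_by_joint[0]) if n_tf > 0 else 0
--
--     total_keyframes = 0
--     for tf_idx in range(n_tf):
--         for j in range(n_joints):
--             total_keyframes += len(keyframes_by_tf_by_joint[tf_idx][j])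
--
--     total_old_style = 0
--     for j in range(n_joints):
--         union_frames_for_joint: set[int] = set()
--         for tf_idx in range(n_tf):
--             union_frames_for_joint.update(keyframes_by_tf_by_joint[tf_idx][j])
--         total_old_style += len(union_frames_for_joint) * n_tf
--
--     global_unique_frames: set[int] = set()
--     for tf_idx in range(n_tf):
--         for j in range(n_joints):
--             global_unique_frames.update(keyframes_by_tf_by_joint[tf_idx][j])
--
--     stats = {
--         "total_keyframes": total_keyframes,
--         "total_keyframes_old_style": total_old_style,
--         "unique_frame_count_global": len(global_unique_frames),
--     }
--
--     return stats
-- ===== SOURCE B (Python) =====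
-- def compute_keyframe_stats(keyframes_by_tf_by_joint):
--     n_tf = len(keyframes_by_tf_by_joint)
--     n_joints = len(keyframes_by_tf_by_joint[0]) if n_tf else 0
--
--     # Transpose: one column per joint, holding that joint's frames across all timeframes.
--     columns = [[f for tf in keyframes_by_tf_by_joint for f in tf[j]]
--                for j in range(n_joints)]
--
--     def n_distinct(xs):
--         # Sort, then count boundaries between adjacent unequal values (no hash sets).
--         count = 0
--         prev = None
--         for v in sorted(xs):
--             if prev is None or v != prev:
--                 count += 1
--             prev = v
--         return count
--
--     return {
--         "total_keyframes": sum(len(col) for col in columns),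
--         "total_keyframes_old_style": sum(n_distinct(col) for col in columns) * n_tf,
--         "unique_frame_count_global": n_distinct([f for col in columns for f in col]),
--     }
-- ===== Notes on version B (the rewrite author's own statement) =====
-- stated objective: alternative
-- what changed: B transposes the data into per-joint columns and counts distinct frames by sorting each column and counting adjacent-unequal boundaries, instead of A's three row-major nested-loop passes over hash sets.
import Mathlib
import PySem

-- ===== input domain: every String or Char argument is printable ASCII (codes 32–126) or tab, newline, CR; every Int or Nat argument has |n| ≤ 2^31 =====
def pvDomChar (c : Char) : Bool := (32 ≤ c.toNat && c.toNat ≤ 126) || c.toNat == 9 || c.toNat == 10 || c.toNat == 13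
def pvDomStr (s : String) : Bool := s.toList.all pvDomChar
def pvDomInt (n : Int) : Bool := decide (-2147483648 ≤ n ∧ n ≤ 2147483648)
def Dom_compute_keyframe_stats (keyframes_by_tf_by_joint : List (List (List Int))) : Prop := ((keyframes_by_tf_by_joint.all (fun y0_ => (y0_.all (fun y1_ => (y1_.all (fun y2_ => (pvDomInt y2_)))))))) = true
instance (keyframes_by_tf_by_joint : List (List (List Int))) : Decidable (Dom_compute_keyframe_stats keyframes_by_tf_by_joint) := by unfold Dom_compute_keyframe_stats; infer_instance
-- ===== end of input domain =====

-- B transposes to per-joint columns and counts distinct frames by sorting each column and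
-- counting adjacent-unequal boundaries, instead of A's three row-major passes over hash sets (objective: alternative).

-- ===== PORT A =====
def compute_keyframe_stats (keyframes_by_tf_by_joint : List (List (List Int))) : List (String × Int) :=
  let k := keyframes_by_tf_by_joint
  let n_tf : Int := (k.length : Int)
  let n_joints : Int := if n_tf > 0 then ((PySem.List.pyGetD k 0 []).length : Int) else 0
  let total_keyframes : Int :=
    (PySem.List.pyRange 0 n_tf 1).foldl (fun acc tf_idx =>
      (PySem.List.pyRange 0 n_joints 1).foldl (fun acc2 j =>
        acc2 + ((PySem.List.pyGetD (PySem.List.pyGetD k tf_idx []) j []).length : Int)) acc) 0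
  let total_old_style : Int :=
    (PySem.List.pyRange 0 n_joints 1).foldl (fun acc j =>
      let u : PySem.Set Int :=
        (PySem.List.pyRange 0 n_tf 1).foldl (fun s tf_idx =>
          PySem.Set.update s (PySem.List.pyGetD (PySem.List.pyGetD k tf_idx []) j [])) PySem.Set.empty
      acc + (PySem.Set.len u) * n_tf) 0
  let global_unique_frames : PySem.Set Int :=
    (PySem.List.pyRange 0 n_tf 1).foldl (fun s tf_idx =>
      (PySem.List.pyRange 0 n_joints 1).foldl (fun s2 j =>
        PySem.Set.update s2 (PySem.List.pyGetD (PySem.List.pyGetD k tf_idx []) j [])) s) PySem.Set.empty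
  [("total_keyframes", total_keyframes),
   ("total_keyframes_old_style", total_old_style),
   ("unique_frame_count_global", PySem.Set.len global_unique_frames)]

-- ===== PORT B =====
-- n_distinct: sort, then count boundaries between adjacent unequal values (no hash sets).
def pvNDistinct (xs : List Int) : Int :=
  let fin : Int × Option Int :=
    (PySem.List.sorted xs (fun x => x) false).foldl
      (fun st v => (if st.2 = some v then st.1 else st.1 + 1, some v)) (0, none)
  fin.1

def compute_keyframe_stats_alt (keyframes_by_tf_by_joint : List (List (List Int))) : List (String × Int) :=
  let k := keyframes_by_tf_by_joint
  let n_tf : Int := (k.length : Int)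
  let n_joints : Int := if n_tf ≠ 0 then ((PySem.List.pyGetD k 0 []).length : Int) else 0
  let columns : List (List Int) :=
    (PySem.List.pyRange 0 n_joints 1).map (fun j =>
      k.flatMap (fun tf => PySem.List.pyGetD tf j []))
  [("total_keyframes", (columns.map (fun col => (col.length : Int))).sum),
   ("total_keyframes_old_style", (columns.map pvNDistinct).sum * n_tf),
   ("unique_frame_count_global", pvNDistinct (columns.flatMap id))]

-- ===== PRECONDITION & SPEC =====
-- Pre_ excludes exactly the ragged inputs (some timeframe shorter than the first) on which A raises IndexError.
def Pre_compute_keyframe_stats (keyframes_by_tf_by_joint : List (List (List Int))) : Prop :=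
  ∀ tf ∈ keyframes_by_tf_by_joint, keyframes_by_tf_by_joint.headI.length ≤ tf.length
instance (keyframes_by_tf_by_joint : List (List (List Int))) : Decidable (Pre_compute_keyframe_stats keyframes_by_tf_by_joint) := by unfold Pre_compute_keyframe_stats; infer_instance
def pvWitness_compute_keyframe_stats : List (List (List Int)) := [[[1, 2], [3]], [[2], []]]

def Spec_compute_keyframe_stats (keyframes_by_tf_by_joint : List (List (List Int))) (out : List (String × Int)) : Prop := out = compute_keyframe_stats_alt keyframes_by_tf_by_joint
instance (keyframes_by_tf_by_joint : List (List (List Int))) (out : List (String × Int)) : Decidable (Spec_compute_keyframe_stats keyframes_by_tf_by_joint out) := by unfold Spec_compute_keyframe_stats; infer_instance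

-- ===== CLAIM (what is proved, stated in full; the proofs are below) =====
def Claim_equal_compute_keyframe_stats : Prop := ∀ (keyframes_by_tf_by_joint : List (List (List Int))), Dom_compute_keyframe_stats keyframes_by_tf_by_joint → Pre_compute_keyframe_stats keyframes_by_tf_by_joint → Spec_compute_keyframe_stats keyframes_by_tf_by_joint (compute_keyframe_stats keyframes_by_tf_by_joint)

-- ===== LEMMAS AND PROOFS =====

-- the fold step of pvNDistinct, named for the proofs
def pvStep2 (st : Int × Option Int) (v : Int) : Int × Option Int :=
  (if st.2 = some v then st.1 else st.1 + 1, some v)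

-- A's per-joint union set, named for the proofs
def pvU (k : List (List (List Int))) (j : Nat) : PySem.Set Int :=
  k.foldl (fun s tf => PySem.Set.update s (tf.getD j [])) PySem.Set.empty

-- joint j's column (B's transposed view)
def pvCol (k : List (List (List Int))) (j : Nat) : List Int :=
  k.flatMap (fun tf => tf.getD j [])

theorem pv_card_insert (v : Int) (s : Finset Int) :
    (insert v s).card = (s.erase v).card + 1 := by
  by_cases h : v ∈ s
  · rw [Finset.insert_eq_self.mpr h, ← Finset.card_erase_add_one h]
  · rw [Finset.card_insert_of_notMem h, Finset.erase_eq_of_notMem h]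

theorem pv_go_some (ys : List Int) : ys.Pairwise (· ≤ ·) →
    ∀ (p c : Int), (∀ y ∈ ys, p ≤ y) →
    (ys.foldl pvStep2 (c, some p)).1 = c + ((ys.toFinset.erase p).card : Int) := by
  induction ys with
  | nil => intro _ p c _; simp
  | cons v t ih =>
    intro hp p c hle
    have hvt : ∀ y ∈ t, v ≤ y := (List.pairwise_cons.mp hp).1
    have ht : t.Pairwise (· ≤ ·) := (List.pairwise_cons.mp hp).2
    rw [List.foldl_cons]
    by_cases hpv : p = v
    · subst hpv
      rw [show pvStep2 (c, some p) p = (c, some p) from by simp [pvStep2]]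
      rw [ih ht p c hvt]
      congr 2
      rw [List.toFinset_cons, Finset.erase_insert_eq_erase]
    · have hlt : p < v := lt_of_le_of_ne (hle v (by simp)) hpv
      have hpt : p ∉ t.toFinset := by
        simp only [List.mem_toFinset]
        intro hmem
        exact absurd (hvt p hmem) (by omega)
      rw [show pvStep2 (c, some p) v = (c + 1, some v) from by simp [pvStep2, hpv]]
      rw [ih ht v (c + 1) hvt]
      rw [List.toFinset_cons, Finset.erase_insert_of_ne (Ne.symm hpv),
          Finset.erase_eq_of_notMem hpt, pv_card_insert]
      push_cast
      ring

theorem pv_ndistinct_eq (xs : List Int) : pvNDistinct xs = (xs.toFinset.card : Int) := by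
  unfold pvNDistinct
  have hperm := PySem.List.sorted_perm xs (fun x => x) false
  have hfin : (PySem.List.sorted xs (fun x => x) false).toFinset = xs.toFinset := by
    ext x; simp [List.mem_toFinset, hperm.mem_iff]
  have hpw : (PySem.List.sorted xs (fun x => x) false).Pairwise (· ≤ ·) := by
    simpa using PySem.List.sorted_pairwise xs (fun x => x)
  rcases hs : PySem.List.sorted xs (fun x => x) false with _ | ⟨v, t⟩
  · have : xs = [] := (PySem.List.sorted_eq_nil_iff xs (fun x => x) false).mp hs
    subst this; simp
  · rw [hs] at hfin hpw
    have hvt : ∀ y ∈ t, v ≤ y := (List.pairwise_cons.mp hpw).1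
    have ht : t.Pairwise (· ≤ ·) := (List.pairwise_cons.mp hpw).2
    show (List.foldl pvStep2 (pvStep2 (0, none) v) t).1 = _
    rw [show pvStep2 (0, none) v = (1, some v) from by simp [pvStep2]]
    rw [pv_go_some t ht v 1 hvt, ← hfin, List.toFinset_cons, pv_card_insert]
    push_cast
    ring

theorem pv_update_append (s : PySem.Set Int) (a b : List Int) :
    PySem.Set.update s (a ++ b) = PySem.Set.update (PySem.Set.update s a) b :=
  List.foldl_append

theorem pv_fold_update {α : Type} (k : List α) (f : α → List Int) :
    ∀ (s : PySem.Set Int),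
    k.foldl (fun s tf => PySem.Set.update s (f tf)) s = PySem.Set.update s (k.flatMap f) := by
  induction k with
  | nil => intro s; rfl
  | cons tf k ih =>
    intro s
    rw [List.foldl_cons, ih, List.flatMap_cons, pv_update_append]

theorem pv_len_ofList (l : List Int) :
    PySem.Set.len (PySem.Set.ofList l) = (l.toFinset.card : Int) := by
  show ((PySem.Set.ofList l).length : Int) = _
  have h1 : (PySem.Set.ofList l).toFinset = l.toFinset := by
    ext x; simp [List.mem_toFinset, PySem.Set.mem_ofList]
  rw [← List.toFinset_card_of_nodup (PySem.Set.nodup_ofList l), h1]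

theorem pv_sum_map_add {α : Type} (l : List α) (a b : α → Int) :
    (l.map (fun j => a j + b j)).sum = (l.map a).sum + (l.map b).sum := by
  induction l with
  | nil => simp
  | cons x l ih => simp [ih]; ring

theorem pv_sum_comm {α : Type} (k : List α) (m : Nat) (f : α → Nat → Int) :
    (k.map (fun x => ((List.range m).map (f x)).sum)).sum
      = ((List.range m).map (fun j => (k.map (fun x => f x j)).sum)).sum := by
  induction k with
  | nil => simp
  | cons x k ih =>
    rw [List.map_cons, List.sum_cons, ih,
        show (fun j => (List.map (fun x_1 => f x_1 j) (x :: k)).sum)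
           = (fun j => f x j + (List.map (fun x_1 => f x_1 j) k).sum) from by
          funext j; simp,
        pv_sum_map_add]

theorem pv_map_getD_range (tf : List (List Int)) (m : Nat) (h : m ≤ tf.length) :
    (List.range m).map (fun j => tf.getD j []) = tf.take m := by
  apply List.ext_getElem
  · simp [Nat.min_eq_left h]
  · intro i h1 h2
    simp at h1
    simp [List.getElem_take, List.getElem?_eq_getElem (by omega : i < tf.length)]

theorem pv_sum_map_mul {α : Type} (l : List α) (f : α → Int) (n : Int) :
    (l.map (fun x => f x * n)).sum = (l.map f).sum * n := by
  induction l with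
  | nil => simp
  | cons x l ih => simp [ih, add_mul]

theorem pv_sum_flatMap {α β : Type} (l : List α) (f : α → List β) (g : β → Int) :
    ((l.flatMap f).map g).sum = (l.map (fun x => ((f x).map g).sum)).sum := by
  induction l with
  | nil => rfl
  | cons x l ih => simp [ih]

theorem pv_A_total (k : List (List (List Int))) (m : Nat) (h : ∀ tf ∈ k, m ≤ tf.length) :
    (PySem.List.pyRange 0 (k.length : Int)).foldl
      (fun acc tf_idx => (PySem.List.pyRange 0 (m : Int)).foldl
        (fun acc2 j => acc2 + ((PySem.List.pyGetD (PySem.List.pyGetD k tf_idx []) j []).length : Int)) acc) 0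
    = ((k.flatMap (fun tf => tf.take m)).map (fun c => (c.length : Int))).sum := by
  rw [PySem.List.foldl_pyRange_zero_pyGetD' k []
        (fun acc tf => (PySem.List.pyRange 0 (m : Int)).foldl
          (fun acc2 j => acc2 + ((PySem.List.pyGetD tf j []).length : Int)) acc) 0]
  rw [PySem.List.foldl_congr_mem k _
        (fun acc tf => acc + ((tf.take m).map (fun c => (c.length : Int))).sum) 0
        (by
          intro acc tf htf
          rw [PySem.List.pyRange_zero_nat, List.foldl_map]
          simp only [PySem.List.pyGetD_natCast]
          rw [PySem.List.foldl_add]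
          rw [show (fun j => (((tf.getD j []).length : Int))) =
                (fun c => ((List.length c : Int))) ∘ (fun j => tf.getD j []) from rfl]
          rw [← List.map_map, pv_map_getD_range tf m (h tf htf)])]
  rw [PySem.List.foldl_add, pv_sum_flatMap, zero_add]

theorem pv_A_global (k : List (List (List Int))) (m : Nat) (h : ∀ tf ∈ k, m ≤ tf.length) :
    (PySem.List.pyRange 0 (k.length : Int)).foldl
      (fun s tf_idx => (PySem.List.pyRange 0 (m : Int)).foldl
        (fun s2 j => s2.update (PySem.List.pyGetD (PySem.List.pyGetD k tf_idx []) j [])) s)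
      PySem.Set.empty
    = (k.flatMap (fun tf => tf.take m)).foldl PySem.Set.update PySem.Set.empty := by
  rw [PySem.List.foldl_pyRange_zero_pyGetD' k []
        (fun s tf => (PySem.List.pyRange 0 (m : Int)).foldl
          (fun s2 j => s2.update (PySem.List.pyGetD tf j [])) s) PySem.Set.empty]
  rw [List.foldl_flatMap]
  apply PySem.List.foldl_congr_mem
  intro s tf htf
  rw [PySem.List.pyRange_zero_nat, List.foldl_map]
  simp only [PySem.List.pyGetD_natCast]
  rw [← pv_map_getD_range tf m (h tf htf), List.foldl_map]

theorem pv_A_old (k : List (List (List Int))) (m : Nat) :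
    (PySem.List.pyRange 0 (m : Int)).foldl
      (fun acc j => acc +
        ((PySem.List.pyRange 0 (k.length : Int)).foldl
          (fun s tf_idx => s.update (PySem.List.pyGetD (PySem.List.pyGetD k tf_idx []) j []))
          PySem.Set.empty).len * (k.length : Int)) 0
    = ((List.range m).map (fun j => (pvU k j).len)).sum * (k.length : Int) := by
  rw [PySem.List.pyRange_zero_nat m, List.foldl_map, PySem.List.foldl_add]
  rw [zero_add, ← pv_sum_map_mul]
  congr 1
  apply List.map_congr_left
  intro j _
  rw [PySem.List.foldl_pyRange_zero_pyGetD' k []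
        (fun s tf => s.update (PySem.List.pyGetD tf ((j : Nat) : Int) [])) PySem.Set.empty]
  simp only [PySem.List.pyGetD_natCast]
  rfl

-- A's per-joint set is exactly set(column j)
theorem pv_U_eq_ofList (k : List (List (List Int))) (j : Nat) :
    pvU k j = PySem.Set.ofList (pvCol k j) := by
  unfold pvU pvCol
  rw [pv_fold_update]
  rfl

-- both global collections have the same distinct elements
theorem pv_global_toFinset (k : List (List (List Int))) (m : Nat) (h : ∀ tf ∈ k, m ≤ tf.length) :
    ((k.flatMap (fun tf => tf.take m)).flatMap id).toFinset
      = (((List.range m).map (fun j => pvCol k j)).flatMap id).toFinset := by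
  ext x
  simp only [List.mem_toFinset, List.mem_flatMap, List.mem_map, List.mem_range, id, pvCol]
  constructor
  · rintro ⟨c, ⟨tf, htf, hc⟩, hx⟩
    rw [← pv_map_getD_range tf m (h tf htf)] at hc
    rcases List.mem_map.mp hc with ⟨j, hj, rfl⟩
    exact ⟨_, ⟨j, List.mem_range.mp hj, rfl⟩, List.mem_flatMap.mpr ⟨tf, htf, hx⟩⟩
  · rintro ⟨c, ⟨j, hj, rfl⟩, hx⟩
    rcases List.mem_flatMap.mp hx with ⟨tf, htf, hxc⟩
    refine ⟨tf.getD j [], ⟨tf, htf, ?_⟩, hxc⟩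
    rw [← pv_map_getD_range tf m (h tf htf)]
    exact List.mem_map.mpr ⟨j, List.mem_range.mpr hj, rfl⟩

theorem pv_col_len (k : List (List (List Int))) (j : Nat) :
    ((pvCol k j).length : Int) = (k.map (fun tf => ((tf.getD j []).length : Int))).sum := by
  unfold pvCol
  rw [List.length_flatMap]
  rw [Nat.cast_list_sum, List.map_map]
  rfl

theorem pv_total_eq (k : List (List (List Int))) (m : Nat) (h : ∀ tf ∈ k, m ≤ tf.length) :
    ((k.flatMap (fun tf => tf.take m)).map (fun c => (c.length : Int))).sum
      = ((List.range m).map (fun j => ((pvCol k j).length : Int))).sum := by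
  rw [pv_sum_flatMap]
  rw [List.map_congr_left (l := k)
        (f := fun tf => ((tf.take m).map (fun c => (c.length : Int))).sum)
        (g := fun tf => ((List.range m).map (fun j => ((tf.getD j []).length : Int))).sum)
        (by
          intro tf htf
          dsimp only
          rw [← pv_map_getD_range tf m (h tf htf), List.map_map]
          rfl)]
  rw [pv_sum_comm]
  congr 1
  apply List.map_congr_left
  intro j _
  rw [pv_col_len]

theorem pv_main (hd : List (List Int)) (tl : List (List (List Int)))
    (h : ∀ tf ∈ hd :: tl, hd.length ≤ tf.length) :
    compute_keyframe_stats (hd :: tl) = compute_keyframe_stats_alt (hd :: tl) := by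
  unfold compute_keyframe_stats compute_keyframe_stats_alt
  simp only [PySem.List.pyGetD_zero_cons, List.length_cons, gt_iff_lt, ne_eq, Nat.cast_eq_zero,
    Nat.cast_pos, Nat.succ_ne_zero, not_false_iff, Nat.succ_pos, if_pos]
  rw [(by simp : ((tl.length + 1 : Nat) : Int) = (((hd :: tl).length : Nat) : Int))]
  set k := hd :: tl with hk
  set m := hd.length with hm
  rw [pv_A_total k m h, pv_A_global k m h, pv_A_old k m]
  -- B side: fold the Nat.cast maps and name the columns
  rw [PySem.List.pyRange_zero_nat m]
  simp only [List.map_map]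
  rw [show ((fun j : Int => k.flatMap fun tf => PySem.List.pyGetD tf j []) ∘ (fun n : Nat => (n : Int)))
        = fun j : Nat => pvCol k j from by
      funext j
      simp only [Function.comp, PySem.List.pyGetD_natCast]
      rfl]
  rw [show ((fun col : List Int => (col.length : Int)) ∘ fun j : Nat => pvCol k j)
        = fun j : Nat => ((pvCol k j).length : Int) from rfl]
  rw [show (pvNDistinct ∘ fun j : Nat => pvCol k j) = fun j : Nat => pvNDistinct (pvCol k j) from rfl]
  -- three components
  congr 2
  · rw [pv_total_eq k m h]
  · congr 2
    congr 1
    apply List.map_congr_left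
    intro j _
    rw [pv_U_eq_ofList, pv_len_ofList, pv_ndistinct_eq]
  · congr 1
    rw [show (List.foldl PySem.Set.update PySem.Set.empty (k.flatMap fun tf => tf.take m))
          = (k.flatMap fun tf => tf.take m).foldl (fun s c => PySem.Set.update s (id c)) PySem.Set.empty from rfl]
    rw [pv_fold_update]
    rw [show PySem.Set.update PySem.Set.empty ((k.flatMap fun tf => tf.take m).flatMap id)
          = PySem.Set.ofList ((k.flatMap fun tf => tf.take m).flatMap id) from rfl]
    rw [pv_len_ofList, pv_ndistinct_eq, pv_global_toFinset k m h]

-- ===== VERDICT (by name: the statement is the Claim_ definition above) =====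
theorem compute_keyframe_stats_spec : Claim_equal_compute_keyframe_stats := by
  intro k _ hPre
  unfold Spec_compute_keyframe_stats
  cases k with
  | nil => rfl
  | cons hd tl =>
    exact pv_main hd tl (by simpa [Pre_compute_keyframe_stats] using hPre)
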